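-- pv_equiv track=rewrite | github.com/pritihinduja11/StringPracticePrograms | pgm13.py | minimumM1
-- ===== SOURCE A (Python) =====
-- def minimumM1(s1):
--     dic=dict()
--     for i in s1:
--         #if element already exist its value is incremented by 1
--         if i in dic:
--             dic[i]+=1
--         #if element doesnt exist in dictionary it is added with value 1
--         else:
--             dic[i]=1
--     res=min(dic,key=dic.get)
--     return res
-- ===== SOURCE B (Python) =====
-- def minimumM1(s1):
--     # sort-then-scan: run-length encode the sorted characters to get each
--     # distinct character's frequency, take the smallest run length, collect
--     # the characters achieving it, and return the first such char of s1.
--     chars = sorted(s1)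
--     runs = []
--     i, n = 0, len(chars)
--     while i < n:
--         j = i
--         while j < n and chars[j] == chars[i]:
--             j += 1
--         runs.append((chars[i], j - i))
--         i = j
--     m = min(cnt for _, cnt in runs)
--     rare = {c for c, cnt in runs if cnt == m}
--     for c in s1:
--         if c in rare:
--             return c
-- ===== Notes on version B (the rewrite author's own statement) =====
-- stated objective: alternative
-- what changed: Replaces the frequency dictionary and min-over-keys with a sort-then-scan: run-length encode the sorted characters to obtain frequencies, take the minimum run length, build the set of characters achieving it, and return the first character of s1 in that set.
import Mathlib
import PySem

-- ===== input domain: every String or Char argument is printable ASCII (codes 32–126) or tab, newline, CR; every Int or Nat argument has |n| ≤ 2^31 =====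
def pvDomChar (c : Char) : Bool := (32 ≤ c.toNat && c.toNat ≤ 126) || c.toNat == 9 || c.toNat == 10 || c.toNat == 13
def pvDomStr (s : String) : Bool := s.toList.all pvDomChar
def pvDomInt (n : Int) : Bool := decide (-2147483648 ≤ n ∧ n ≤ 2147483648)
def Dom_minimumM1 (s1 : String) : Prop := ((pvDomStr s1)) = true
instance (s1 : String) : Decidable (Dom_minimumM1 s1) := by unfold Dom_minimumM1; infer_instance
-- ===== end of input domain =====

-- B replaces the frequency dictionary + min-over-keys with a sort-then-scan:
-- run-length encode the sorted characters, take the minimal run length, and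
-- return the first character of s1 whose run has that length (alternative algorithm, not claimed faster).

-- ===== PORT A =====
-- loop: if i in dic: dic[i]+=1 else: dic[i]=1; then min(dic, key=dic.get)
def minimumM1 (s1 : String) : String :=
  let dic : PySem.Dict Char Int :=
    s1.toList.foldl
      (fun d i => if d.contains i then d.modify i 0 (· + 1) else d.insert i 1)
      PySem.Dict.empty
  match PySem.List.min? dic.keys (fun k => dic.getD k 0) with
  | some c => String.ofList [c]
  | none => ""  -- unreachable under Pre_ (Python's min raises ValueError on an empty dict)

-- ===== PORT B =====
-- run-length encoding of a list: the two nested while loops over indices i, j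
-- ('while j < n and chars[j] == chars[i]: j += 1') advance over the maximal run
-- starting at i; ported as takeWhile/dropWhile on the remaining suffix (exact).
def pvRle : List Char → List (Char × Int)
  | [] => []
  | c :: t =>
    (c, (1 : Int) + (t.takeWhile (fun x => x == c)).length) ::
      pvRle (t.dropWhile (fun x => x == c))
  termination_by l => l.length
  decreasing_by
    exact Nat.lt_succ_of_le ((List.dropWhile_sublist _).length_le)

-- chars = sorted(s1); runs = rle(chars); m = min(cnt for _,cnt in runs);
-- rare = {c for c,cnt in runs if cnt == m}; first c in s1 with c in rare
def minimumM1_alt (s1 : String) : String :=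
  let chars := PySem.List.sorted s1.toList (fun c => c) false
  let runs := pvRle chars
  match PySem.List.min? (runs.map (fun r => r.2)) (fun v => v) with
  | some m =>
    let rare : PySem.Set Char :=
      PySem.Set.ofList ((runs.filter (fun r => r.2 == m)).map (fun r => r.1))
    (match s1.toList.find? (fun c => rare.contains c) with
     | some c => String.ofList [c]
     | none => "")  -- unreachable: s1 nonempty ⇒ some char attains the minimal count
  | none => ""  -- min() of an empty sequence raises ValueError, excluded by Pre_

-- ===== PRECONDITION & SPEC =====
-- Pre_ excludes only the empty string, on which both Pythons raise ValueError (min of empty sequence).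
def Pre_minimumM1 (s1 : String) : Prop := s1 ≠ ""
instance (s1 : String) : Decidable (Pre_minimumM1 s1) := by unfold Pre_minimumM1; infer_instance
def pvWitness_minimumM1 : String := "abracadabra"

def Spec_minimumM1 (s1 : String) (out : String) : Prop := out = minimumM1_alt s1
instance (s1 : String) (out : String) : Decidable (Spec_minimumM1 s1 out) := by unfold Spec_minimumM1; infer_instance

-- ===== CLAIM (what is proved, stated in full; the proofs are below) =====
def Claim_equal_minimumM1 : Prop := ∀ (s1 : String), Dom_minimumM1 s1 → Pre_minimumM1 s1 → Spec_minimumM1 s1 (minimumM1 s1)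

-- ===== LEMMAS AND PROOFS =====

-- A's branching loop body is extensionally Counter's modify step
lemma loop_eq_counter (xs : List Char) :
    xs.foldl (fun d i => if d.contains i then d.modify i 0 (· + 1) else d.insert i 1)
      (PySem.Dict.empty : PySem.Dict Char Int)
      = PySem.Dict.counter xs := by
  rw [PySem.Dict.counter_eq_foldl]
  apply PySem.List.foldl_congr_mem
  intro d i _
  by_cases h : d.contains i
  · simp [h]
  · simp only [h, PySem.Dict.modify]
    rw [PySem.Dict.getD_of_not_contains (h := by simpa using h)]
    norm_num

-- find? is unchanged by a pointwise-equal predicate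
lemma find?_congr_mem {α : Type} (l : List α) (p q : α → Bool)
    (h : ∀ x ∈ l, p x = q x) : l.find? p = l.find? q := by
  induction l with
  | nil => rfl
  | cons a t ih =>
    have ha := h a (by simp)
    rcases hq : q a with _ | _
    · rw [List.find?_cons_of_neg (by rw [ha, hq]; simp), List.find?_cons_of_neg (by rw [hq]; simp)]
      exact ih fun x hx => h x (by simp [hx])
    · rw [List.find?_cons_of_pos (by rw [ha, hq]), List.find?_cons_of_pos (by rw [hq])]

-- Set.add only ever appends
lemma foldl_add_extend {α : Type} [BEq α] (t : List α) (s : List α) :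
    ∃ r, t.foldl PySem.Set.add s = s ++ r := by
  induction t generalizing s with
  | nil => exact ⟨[], by simp⟩
  | cons x t ih =>
    rcases ih (PySem.Set.add s x) with ⟨r, hr⟩
    by_cases hc : s.contains x
    · exact ⟨r, by simpa [PySem.Set.add, hc] using hr⟩
    · exact ⟨x :: r, by rw [List.foldl_cons, hr, PySem.Set.add, if_neg (by simp [hc])]; simp⟩

-- dedup keeps the first element satisfying a (value-based) predicate
lemma find?_foldl_add {α : Type} [BEq α] [LawfulBEq α] (p : α → Bool) :
    ∀ (t s : List α), (∀ y ∈ s, p y = false) →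
      (t.foldl PySem.Set.add s).find? p = t.find? p := by
  intro t
  induction t with
  | nil =>
    intro s hs
    simpa using List.find?_eq_none.mpr (fun x hx => by simp [hs x hx])
  | cons x t ih =>
    intro s hs
    rcases hp : p x with _ | _
    · rw [List.foldl_cons, List.find?_cons_of_neg (by simp [hp])]
      apply ih
      intro y hy
      by_cases hc : PySem.Set.contains s x = true
      · rw [PySem.Set.add, if_pos hc] at hy; exact hs y hy
      · rw [PySem.Set.add, if_neg hc] at hy
        rcases List.mem_append.mp hy with h | h
        · exact hs y h
        · simp only [List.mem_singleton] at h; subst h; exact hp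
    · rw [List.foldl_cons, List.find?_cons_of_pos hp]
      have hxs : ¬ PySem.Set.contains s x = true := by
        intro hbx
        have hx : x ∈ s := List.contains_iff_mem.mp hbx
        rw [hs x hx] at hp; exact Bool.false_ne_true hp
      rcases foldl_add_extend t (s ++ [x]) with ⟨r, hr⟩
      rw [PySem.Set.add, if_neg hxs, hr, List.find?_append, List.find?_append]
      have hnone : s.find? p = none := List.find?_eq_none.mpr (fun y hy => by simp [hs y hy])
      simp [hnone, hp]

lemma find?_dedup {α : Type} [BEq α] [LawfulBEq α] (p : α → Bool) (l : List α) :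
    (PySem.List.dedup l).find? p = l.find? p := by
  rw [PySem.List.dedup, PySem.Set.ofList]
  exact find?_foldl_add p l [] (by simp)

-- min? with strict-< updates returns the FIRST element attaining the minimum key
lemma minFold_eq_find? {α : Type} (k : α → Int) :
    ∀ (t : List α) (a : α) (m : Int),
      (∀ y ∈ a :: t, m ≤ k y) → (∃ y ∈ a :: t, k y = m) →
      List.foldl (fun acc x => match acc with
        | none => some x
        | some mm => if k x < k mm then some x else some mm) (some a) t
        = (a :: t).find? (fun c => k c == m) := by
  intro t
  induction t with
  | nil =>
    intro a m _ hex
    rcases hex with ⟨y, hy, hky⟩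
    simp only [List.mem_singleton] at hy; subst hy
    rw [List.foldl_nil, List.find?_cons_of_pos (by simp [hky])]
  | cons b t ih =>
    intro a m hlb hex
    rw [List.foldl_cons]
    by_cases hba : k b < k a
    · have hstep : (match (some a : Option α) with
        | none => some b
        | some mm => if k b < k mm then some b else some mm) = some b := by simp [hba]
      rw [hstep]
      have hma : (k a == m) = false := by
        have h1 : m ≤ k b := hlb b (by simp)
        have h2 : m < k a := lt_of_le_of_lt h1 hba
        simp [h2.ne']
      rw [List.find?_cons_of_neg (by simp [hma])]
      apply ih b m (fun y hy => hlb y (List.mem_cons_of_mem a hy))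
      rcases hex with ⟨y, hy, hky⟩
      rcases List.mem_cons.mp hy with rfl | hy'
      · exfalso; rw [hky] at hma; simp at hma
      · exact ⟨y, hy', hky⟩
    · have hstep : (match (some a : Option α) with
        | none => some b
        | some mm => if k b < k mm then some b else some mm) = some a := by simp [hba]
      rw [hstep]
      have hsub : ∃ y ∈ a :: t, k y = m := by
        rcases hex with ⟨y, hy, hky⟩
        rcases List.mem_cons.mp hy with rfl | hy'
        · exact ⟨y, by simp, hky⟩
        rcases List.mem_cons.mp hy' with rfl | hy''
        · have h1 : m ≤ k a := hlb a (by simp)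
          have h2 : k a ≤ m := hky ▸ not_lt.mp hba
          exact ⟨a, by simp, le_antisymm h2 h1⟩
        · exact ⟨y, List.mem_cons_of_mem a hy'', hky⟩
      rw [ih a m (fun y hy => hlb y (by
        rcases List.mem_cons.mp hy with rfl | hy'
        · simp
        · exact List.mem_cons_of_mem a (List.mem_cons_of_mem b hy'))) hsub]
      by_cases hpa : (k a == m) = true
      · rw [List.find?_cons_of_pos (p := fun c => k c == m) hpa,
            List.find?_cons_of_pos (p := fun c => k c == m) hpa]
      · have hpb : (k b == m) = false := by
          rcases hb : (k b == m) with _ | _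
          · rfl
          · exfalso
            have hbm : k b = m := by simpa using hb
            have h1 : m ≤ k a := hlb a (by simp)
            have h2 : k a ≤ m := hbm ▸ not_lt.mp hba
            exact hpa (by simp [le_antisymm h2 h1])
        rw [List.find?_cons_of_neg (p := fun c => k c == m) (by simp at hpa ⊢; exact hpa),
            List.find?_cons_of_neg (p := fun c => k c == m) (by simp at hpa ⊢; exact hpa),
            List.find?_cons_of_neg (p := fun c => k c == m) (by simp [hpb])]

lemma min?_eq_find? {α : Type} (k : α → Int) (l : List α) (m : Int)
    (hlb : ∀ y ∈ l, m ≤ k y) (hex : ∃ y ∈ l, k y = m) :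
    PySem.List.min? l k = l.find? (fun c => k c == m) := by
  cases l with
  | nil => rcases hex with ⟨y, hy, _⟩; simp at hy
  | cons a t =>
    rw [PySem.List.min?, List.foldl_cons]
    exact minFold_eq_find? k t a m hlb hex

-- c does not reappear after its run in a ≤-sorted list
lemma not_mem_dropWhile_sorted (c : Char) :
    ∀ (t : List Char), (c :: t).Pairwise (· ≤ ·) → c ∉ t.dropWhile (fun x => x == c) := by
  intro t
  induction t with
  | nil => simp [List.dropWhile]
  | cons a t ih =>
    intro h
    rcases List.pairwise_cons.mp h with ⟨h1, h2⟩
    rw [List.dropWhile_cons]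
    by_cases hac : (a == c) = true
    · rw [if_pos hac]
      apply ih
      exact List.pairwise_cons.mpr ⟨fun x hx => h1 x (List.mem_cons_of_mem a hx),
        (List.pairwise_cons.mp h2).2⟩
    · rw [if_neg hac]
      intro hmem
      rcases List.mem_cons.mp hmem with rfl | hmem'
      · exact hac (by simp)
      · have hca : c ≤ a := h1 a (by simp)
        have hax : a ≤ c := (List.pairwise_cons.mp h2).1 c hmem'
        exact hac (by simp [le_antisymm hax hca])

lemma foldl_add_cons_of_not_mem {α : Type} [BEq α] [LawfulBEq α] (x : α) :
    ∀ (t s : List α), x ∉ t →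
      t.foldl PySem.Set.add (x :: s) = x :: t.foldl PySem.Set.add s := by
  intro t
  induction t with
  | nil => intro s _; rfl
  | cons a t ih =>
    intro s h
    have hax : ¬ a = x := fun e => h (by simp [e])
    rw [List.foldl_cons, List.foldl_cons]
    have hconsc : PySem.Set.contains (x :: s) a = PySem.Set.contains s a := by
      simp [PySem.Set.contains, List.contains_cons, hax]
    have hstep : PySem.Set.add (x :: s) a = x :: PySem.Set.add s a := by
      rw [PySem.Set.add, PySem.Set.add, hconsc]
      by_cases hc : PySem.Set.contains s a = true
      · rw [if_pos hc, if_pos hc]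
      · rw [if_neg hc, if_neg hc]; rfl
    rw [hstep]
    exact ih _ (fun hx => h (List.mem_cons_of_mem a hx))

lemma foldl_add_const (c : Char) (s : List Char) (hc : PySem.Set.contains s c = true) :
    ∀ (tw : List Char), (∀ y ∈ tw, y = c) → tw.foldl PySem.Set.add s = s := by
  intro tw
  induction tw with
  | nil => intro _; rfl
  | cons a t ih =>
    intro h
    have ha : a = c := h a (by simp)
    rw [List.foldl_cons, PySem.Set.add, if_pos (ha ▸ hc)]
    exact ih (fun y hy => h y (List.mem_cons_of_mem a hy))

-- on a ≤-sorted list, run-length encoding is exactly (distinct chars, their counts)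
lemma pvRle_sorted : ∀ (l : List Char), l.Pairwise (· ≤ ·) →
    pvRle l = (PySem.List.dedup l).map (fun c => (c, (l.count c : Int))) := by
  intro l
  induction l using pvRle.induct with
  | case1 => intro _; simp [pvRle, PySem.List.dedup, PySem.Set.ofList]
  | case2 c t ih =>
    intro hpw
    have htsplit : t.takeWhile (fun x => x == c) ++ t.dropWhile (fun x => x == c) = t :=
      List.takeWhile_append_dropWhile
    have htw : ∀ y ∈ t.takeWhile (fun x => x == c), y = c := by
      intro y hy
      simpa using List.mem_takeWhile_imp hy
    have hpwt : t.Pairwise (· ≤ ·) := (List.pairwise_cons.mp hpw).2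
    have hdwpw : (t.dropWhile (fun x => x == c)).Pairwise (· ≤ ·) :=
      List.Pairwise.sublist (List.dropWhile_sublist _) hpwt
    have hcd : c ∉ t.dropWhile (fun x => x == c) := not_mem_dropWhile_sorted c t hpw
    have hded : PySem.List.dedup (c :: t)
        = c :: PySem.List.dedup (t.dropWhile (fun x => x == c)) := by
      rw [PySem.List.dedup, PySem.List.dedup, PySem.Set.ofList, PySem.Set.ofList]
      conv_lhs => rw [← htsplit]
      rw [List.foldl_cons]
      have h0 : PySem.Set.add (PySem.Set.empty : PySem.Set Char) c = [c] := rfl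
      rw [h0, List.foldl_append, foldl_add_const c [c] (by simp [PySem.Set.contains]) _ htw]
      exact foldl_add_cons_of_not_mem c _ [] hcd
    have hcnt_c : ((c :: t).count c : Int) = 1 + (t.takeWhile (fun x => x == c)).length := by
      have h1 : (t.takeWhile (fun x => x == c)).count c = (t.takeWhile (fun x => x == c)).length :=
        List.count_eq_length.mpr (fun b hb => (htw b hb).symm)
      have h2 : (t.dropWhile (fun x => x == c)).count c = 0 := List.count_eq_zero.mpr hcd
      have h3 : t.count c = (t.takeWhile (fun x => x == c)).count c
          + (t.dropWhile (fun x => x == c)).count c := by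
        conv_lhs => rw [← htsplit]
        rw [List.count_append]
      have : (c :: t).count c = (t.takeWhile (fun x => x == c)).length + 1 := by
        rw [List.count_cons_self, h3, h1, h2]
      rw [this]; push_cast; ring
    rw [pvRle, hded, List.map_cons, ih hdwpw]
    congr 1
    · rw [hcnt_c]
    · apply List.map_congr_left
      intro c' hc'
      have hc'dw : c' ∈ t.dropWhile (fun x => x == c) := (PySem.List.mem_dedup _ _).mp hc'
      have hc'c : c' ≠ c := fun e => hcd (e ▸ hc'dw)
      have htwz : (t.takeWhile (fun x => x == c)).count c' = 0 :=
        List.count_eq_zero.mpr (fun hm => hc'c (htw c' hm))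
      have h3 : t.count c' = (t.takeWhile (fun x => x == c)).count c'
          + (t.dropWhile (fun x => x == c)).count c' := by
        conv_lhs => rw [← htsplit]
        rw [List.count_append]
      have : (c :: t).count c' = (t.dropWhile (fun x => x == c)).count c' := by
        rw [List.count_cons_of_ne (fun e => hc'c e.symm), h3, htwz, Nat.zero_add]
      rw [this]

-- ===== VERDICT (by name: the statement is the Claim_ definition above) =====
theorem minimumM1_spec : Claim_equal_minimumM1 := by
  intro s1 _ hpre
  have hxs : s1.toList ≠ [] := fun h => hpre (String.toList_eq_nil_iff.mp h)
  unfold Spec_minimumM1 minimumM1 minimumM1_alt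
  simp only [loop_eq_counter, PySem.Dict.keys_counter, PySem.Dict.getD_counter]
  have hpw : (PySem.List.sorted s1.toList (fun c => c) false).Pairwise (· ≤ ·) :=
    PySem.List.sorted_pairwise s1.toList (fun c => c)
  have hperm := PySem.List.sorted_perm s1.toList (fun c => c) false
  have hrle : pvRle (PySem.List.sorted s1.toList (fun c => c) false)
      = (PySem.List.dedup (PySem.List.sorted s1.toList (fun c => c) false)).map
          (fun c => (c, (s1.toList.count c : Int))) := by
    rw [pvRle_sorted _ hpw]
    exact List.map_congr_left (fun c _ => by rw [hperm.count_eq])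
  have hcounts : (pvRle (PySem.List.sorted s1.toList (fun c => c) false)).map (fun r => r.2)
      = (PySem.List.dedup (PySem.List.sorted s1.toList (fun c => c) false)).map
          (fun c => (s1.toList.count c : Int)) := by
    rw [hrle, List.map_map]; rfl
  have hdne : PySem.List.dedup (PySem.List.sorted s1.toList (fun c => c) false) ≠ [] := by
    intro hd
    rcases List.exists_mem_of_ne_nil s1.toList hxs with ⟨a, ha⟩
    have : a ∈ PySem.List.dedup (PySem.List.sorted s1.toList (fun c => c) false) :=
      (PySem.List.mem_dedup _ _).mpr ((PySem.List.mem_sorted _ _ _ _).mpr ha)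
    rw [hd] at this; simp at this
  rcases hmin : PySem.List.min?
      ((pvRle (PySem.List.sorted s1.toList (fun c => c) false)).map (fun r => r.2))
      (fun v => v) with _ | m
  · exfalso
    rw [PySem.List.min?_eq_none_iff, hcounts] at hmin
    exact hdne (List.map_eq_nil_iff.mp hmin)
  · have hmem := PySem.List.min?_mem hmin
    have hlb := PySem.List.min?_isMin hmin
    rw [hcounts] at hmem
    rcases List.mem_map.mp hmem with ⟨c0, hc0, hc0m⟩
    have hc0xs : c0 ∈ s1.toList :=
      (PySem.List.mem_sorted _ _ _ _).mp ((PySem.List.mem_dedup _ _).mp hc0)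
    have hlb' : ∀ c ∈ s1.toList, m ≤ (s1.toList.count c : Int) := by
      intro c hc
      refine hlb _ ?_
      rw [hcounts]
      exact List.mem_map.mpr ⟨c,
        (PySem.List.mem_dedup _ _).mpr ((PySem.List.mem_sorted _ _ _ _).mpr hc), rfl⟩
    have hA : PySem.List.min? (PySem.Set.ofList s1.toList) (fun c => (s1.toList.count c : Int))
        = s1.toList.find? (fun c => (s1.toList.count c : Int) == m) := by
      rw [min?_eq_find? _ _ m
        (fun y hy => hlb' y ((PySem.Set.mem_ofList _ _).mp hy))
        ⟨c0, (PySem.Set.mem_ofList _ _).mpr hc0xs, hc0m⟩]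
      exact find?_dedup _ s1.toList
    have hrare : ∀ c ∈ s1.toList,
        (PySem.Set.ofList
          (((pvRle (PySem.List.sorted s1.toList (fun c => c) false)).filter
              (fun r => r.2 == m)).map (fun r => r.1))).contains c
          = ((s1.toList.count c : Int) == m) := by
      intro c hc
      by_cases hcm : (s1.toList.count c : Int) = m
      · have hmemf : c ∈ ((pvRle (PySem.List.sorted s1.toList (fun c => c) false)).filter
            (fun r => r.2 == m)).map (fun r => r.1) := by
          refine List.mem_map.mpr ⟨(c, (s1.toList.count c : Int)), List.mem_filter.mpr ⟨?_, by simp [hcm]⟩, rfl⟩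
          rw [hrle]
          exact List.mem_map.mpr ⟨c,
            (PySem.List.mem_dedup _ _).mpr ((PySem.List.mem_sorted _ _ _ _).mpr hc), rfl⟩
        have : c ∈ PySem.Set.ofList (((pvRle (PySem.List.sorted s1.toList (fun c => c) false)).filter
            (fun r => r.2 == m)).map (fun r => r.1)) := (PySem.Set.mem_ofList _ _).mpr hmemf
        rw [PySem.Set.contains, List.contains_iff_mem.mpr this]
        simp [hcm]
      · have hnm : c ∉ PySem.Set.ofList (((pvRle (PySem.List.sorted s1.toList (fun c => c) false)).filter
            (fun r => r.2 == m)).map (fun r => r.1)) := by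
          intro hin
          rcases List.mem_map.mp ((PySem.Set.mem_ofList _ _).mp hin) with ⟨r, hrf, hr1⟩
          rcases List.mem_filter.mp hrf with ⟨hrmem, hr2⟩
          rw [hrle] at hrmem
          rcases List.mem_map.mp hrmem with ⟨c', _, hc'⟩
          apply hcm
          have h1 : r.2 = m := by simpa using hr2
          have h2 : c' = c := by rw [← hc'] at hr1; exact hr1
          rw [← h1, ← hc', ← h2]
        have hcontains : (PySem.Set.ofList (((pvRle (PySem.List.sorted s1.toList (fun c => c) false)).filter
            (fun r => r.2 == m)).map (fun r => r.1))).contains c = false := by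
          apply Bool.eq_false_iff.mpr
          intro hb
          rw [PySem.Set.contains] at hb
          exact hnm (List.contains_iff_mem.mp hb)
        rw [hcontains]
        simp [hcm]
    have hB : s1.toList.find? (fun c =>
          (PySem.Set.ofList (((pvRle (PySem.List.sorted s1.toList (fun c => c) false)).filter
            (fun r => r.2 == m)).map (fun r => r.1))).contains c)
        = s1.toList.find? (fun c => (s1.toList.count c : Int) == m) :=
      find?_congr_mem _ _ _ hrare
    rw [hmin, hA]
    dsimp only
    rw [hB]
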